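-- pv_equiv track=rewrite | github.com/jax-md/jax-md | jax_md/_nn/util.py | _haiku_segment_to_nnx
-- ===== SOURCE A (Python) =====
-- _HAIKU_TO_NNX = {
--   'linear': 'layers',
--   'EdgeFunction': 'edge_fns',
--   'NodeFunction': 'node_fns',
--   'GlobalFunction': 'global_fns',
-- }
--
-- def _haiku_segment_to_nnx(segment):
--   """Map a Haiku-era path segment to the NNX attribute naming convention.
--
--   ``'linear'`` -> ``'layers_0'``,  ``'linear_1'`` -> ``'layers_1'``,
--   ``'EdgeFunction'`` -> ``'edge_fns_0'``, ``'EdgeFunction_1'`` -> ``'edge_fns_1'``.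
--   Segments not in the map are returned as-is.
--   """
--   for haiku_name, nnx_name in _HAIKU_TO_NNX.items():
--     if segment == haiku_name:
--       return (f'{nnx_name}_0',)
--     if segment.startswith(haiku_name + '_'):
--       suffix = segment[len(haiku_name) + 1 :]
--       if suffix.isdigit():
--         return (f'{nnx_name}_{suffix}',)
--   return (segment,)
-- ===== SOURCE B (Python) =====
-- _HAIKU_TO_NNX = {
--   'linear': 'layers',
--   'EdgeFunction': 'edge_fns',
--   'NodeFunction': 'node_fns',
--   'GlobalFunction': 'global_fns',
-- }
--
-- def _haiku_segment_to_nnx(segment):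
--   """Map a Haiku-era path segment to the NNX attribute naming convention.
--
--   Parses the segment once (strip the trailing digit run, check for the '_'
--   separator, one dict lookup) instead of scanning every key of the map.
--   """
--   base = segment.rstrip('0123456789')
--   if base.endswith('_') and len(base) < len(segment):
--     nnx = _HAIKU_TO_NNX.get(base[:-1])
--     if nnx is not None:
--       return (nnx + segment[len(base) - 1:],)
--   nnx = _HAIKU_TO_NNX.get(segment)
--   if nnx is not None:
--     return (nnx + '_0',)
--   return (segment,)
-- ===== Notes on version B (the rewrite author's own statement) =====
-- stated objective: simpler
-- what changed: Instead of looping over every key of _HAIKU_TO_NNX and testing equality/startswith per key, B parses the segment once (strip the trailing digit run, check the '_' separator) and does a single direct dict lookup.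
import Mathlib
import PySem

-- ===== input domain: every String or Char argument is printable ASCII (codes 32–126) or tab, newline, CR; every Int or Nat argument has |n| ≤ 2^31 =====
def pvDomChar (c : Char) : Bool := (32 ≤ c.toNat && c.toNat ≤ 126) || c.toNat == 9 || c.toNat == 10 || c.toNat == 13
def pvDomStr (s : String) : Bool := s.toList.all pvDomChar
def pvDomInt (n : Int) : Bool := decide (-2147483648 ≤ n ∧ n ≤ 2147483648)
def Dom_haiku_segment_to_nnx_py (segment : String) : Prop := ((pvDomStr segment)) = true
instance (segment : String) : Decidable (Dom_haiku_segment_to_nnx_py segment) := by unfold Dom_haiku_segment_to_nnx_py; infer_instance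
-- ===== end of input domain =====

-- B replaces A's scan over all four map keys by parsing the segment once
-- (strip the trailing digit run, check the '_' separator, one direct lookup); objective: simpler.

-- the module constant _HAIKU_TO_NNX as an association list (shared table of both ports):
-- [linear -> layers, EdgeFunction -> edge_fns, NodeFunction -> node_fns, GlobalFunction -> global_fns]
def pvTable : List (List Char × List Char) :=
  [(['l','i','n','e','a','r'], ['l','a','y','e','r','s']),
   (['E','d','g','e','F','u','n','c','t','i','o','n'], ['e','d','g','e','_','f','n','s']),
   (['N','o','d','e','F','u','n','c','t','i','o','n'], ['n','o','d','e','_','f','n','s']),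
   (['G','l','o','b','a','l','F','u','n','c','t','i','o','n'], ['g','l','o','b','a','l','_','f','n','s'])]

-- ===== PORT A =====
-- the for-loop over _HAIKU_TO_NNX.items() with its two early returns
def pvGoA (seg : List Char) : List (List Char × List Char) → List String
  | [] => [String.ofList seg]                                           -- return (segment,)
  | (haiku_name, nnx_name) :: rest =>
    if seg = haiku_name then [String.ofList (nnx_name ++ ['_', '0'])]   -- f'{nnx_name}_0'
    else if PySem.Chars.startswith seg (haiku_name ++ ['_']) then
      -- suffix = segment[len(haiku_name) + 1 :]
      let suffix := PySem.Chars.slice seg (some ((haiku_name.length + 1 : Nat) : Int)) none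
      if PySem.Chars.strIsdigit suffix then [String.ofList (nnx_name ++ '_' :: suffix)]  -- f'{nnx_name}_{suffix}'
      else pvGoA seg rest
    else pvGoA seg rest

def haiku_segment_to_nnx_py (segment : String) : List String :=
  pvGoA segment.toList pvTable

-- ===== PORT B =====
-- hand port of segment.rstrip('0123456789') (exact: PySem.Chars.isdigit is the test c ∈ '0'..'9',
-- i.e. exactly membership in that char set): drop the trailing digit run, via the reverse
def pvRstripDigits (cs : List Char) : List Char :=
  (cs.reverse.dropWhile PySem.Chars.isdigit).reverse

-- B's body on the code points (dict .get = List.lookup on the association list)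
def pvGoB (cs : List Char) : List String :=
  let base := pvRstripDigits cs                                        -- segment.rstrip('0123456789')
  if PySem.Chars.endswith base ['_'] && decide (base.length < cs.length) then
    match List.lookup base.dropLast pvTable with                       -- _HAIKU_TO_NNX.get(base[:-1])
    | some nnx => [String.ofList (nnx ++ cs.drop (base.length - 1))]   -- (nnx + segment[len(base)-1:],)
    | none =>
      match List.lookup cs pvTable with                                -- _HAIKU_TO_NNX.get(segment)
      | some nnx => [String.ofList (nnx ++ ['_', '0'])]                -- (nnx + '_0',)
      | none => [String.ofList cs]                                     -- (segment,)
  else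
    match List.lookup cs pvTable with
    | some nnx => [String.ofList (nnx ++ ['_', '0'])]
    | none => [String.ofList cs]

def haiku_segment_to_nnx_py_alt (segment : String) : List String :=
  pvGoB segment.toList

-- ===== PRECONDITION & SPEC =====
def Spec_haiku_segment_to_nnx_py (segment : String) (out : List String) : Prop := out = haiku_segment_to_nnx_py_alt segment
instance (segment : String) (out : List String) : Decidable (Spec_haiku_segment_to_nnx_py segment out) := by unfold Spec_haiku_segment_to_nnx_py; infer_instance

-- ===== CLAIM (what is proved, stated in full; the proofs are below) =====
def Claim_equal_haiku_segment_to_nnx_py : Prop := ∀ (segment : String), Dom_haiku_segment_to_nnx_py segment → Spec_haiku_segment_to_nnx_py segment (haiku_segment_to_nnx_py segment)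

-- ===== LEMMAS AND PROOFS =====

-- splitting off the trailing digit run: cs = rstrip-part ++ run
theorem pv_split (cs : List Char) :
    cs = pvRstripDigits cs ++ (cs.reverse.takeWhile PySem.Chars.isdigit).reverse := by
  unfold pvRstripDigits
  symm
  rw [← List.reverse_append, List.takeWhile_append_dropWhile, List.reverse_reverse]

-- the trailing run consists of digits
theorem pv_run_digits (cs : List Char) :
    ((cs.reverse.takeWhile PySem.Chars.isdigit).reverse).all PySem.Chars.isdigit = true := by
  rw [List.all_reverse]
  exact List.all_eq_true.mpr (fun x hx => List.mem_takeWhile_imp hx)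

-- rstripping K ++ '_' :: d (d all digits) leaves K ++ ['_']
theorem pv_base_pat (K d : List Char) (hd : d.all PySem.Chars.isdigit = true) :
    pvRstripDigits (K ++ '_' :: d) = K ++ ['_'] := by
  unfold pvRstripDigits
  have h1 : d.reverse.dropWhile PySem.Chars.isdigit = [] := by
    rw [List.dropWhile_eq_nil_iff]
    intro x hx
    exact List.all_eq_true.mp hd x (List.mem_reverse.mp hx)
  have h2 : (K ++ '_' :: d).reverse = d.reverse ++ '_' :: K.reverse := by simp
  rw [h2, List.dropWhile_append, h1]
  simp [List.dropWhile_cons_of_neg, PySem.Chars.isdigit]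

-- if A's startswith-and-digits test fires for key K, the segment has the K ++ '_' ++ digits shape
theorem pv_fire (cs K : List Char)
    (hs : PySem.Chars.startswith cs (K ++ ['_']) = true)
    (hd : PySem.Chars.strIsdigit (PySem.Chars.slice cs (some ((K.length + 1 : Nat) : Int)) none) = true) :
    ∃ d, d ≠ [] ∧ d.all PySem.Chars.isdigit = true ∧ cs = K ++ '_' :: d := by
  rw [PySem.Chars.startswith_iff] at hs
  obtain ⟨r, hr⟩ := hs
  have hslice : PySem.Chars.slice cs (some ((K.length + 1 : Nat) : Int)) none = r := by
    simp only [PySem.Chars.slice_eq_listSlice, PySem.List.slice_from_natCast]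
    rw [← hr]
    exact List.drop_left' (by simp)
  rw [hslice] at hd
  unfold PySem.Chars.strIsdigit at hd
  simp only [Bool.and_eq_true, Bool.not_eq_true', List.isEmpty_eq_false_iff] at hd
  refine ⟨r, hd.1, List.all_eq_true.mpr (fun x hx => List.all_eq_true.mp hd.2 x hx), ?_⟩
  rw [← hr, List.append_assoc]
  rfl

-- one non-firing step of A's loop
theorem pv_step (cs k v : List Char) (rest : List (List Char × List Char)) (hne : cs ≠ k)
    (hnof : ¬ (PySem.Chars.startswith cs (k ++ ['_']) = true ∧
               PySem.Chars.strIsdigit (PySem.Chars.slice cs (some ((k.length + 1 : Nat) : Int)) none) = true)) :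
    pvGoA cs ((k, v) :: rest) = pvGoA cs rest := by
  simp only [pvGoA]
  rw [if_neg hne]
  by_cases hs : PySem.Chars.startswith cs (k ++ ['_']) = true
  · rw [if_pos hs, if_neg (fun h => hnof ⟨hs, h⟩)]
  · rw [if_neg hs]

-- which keys the table lookup can return
theorem pv_key_cases (t nn : List Char) (h : List.lookup t pvTable = some nn) :
    (t = ['l','i','n','e','a','r'] ∧ nn = ['l','a','y','e','r','s']) ∨
    (t = ['E','d','g','e','F','u','n','c','t','i','o','n'] ∧ nn = ['e','d','g','e','_','f','n','s']) ∨
    (t = ['N','o','d','e','F','u','n','c','t','i','o','n'] ∧ nn = ['n','o','d','e','_','f','n','s']) ∨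
    (t = ['G','l','o','b','a','l','F','u','n','c','t','i','o','n'] ∧ nn = ['g','l','o','b','a','l','_','f','n','s']) := by
  by_cases h1 : t = ['l','i','n','e','a','r']
  · subst h1; simp [pvTable] at h; simp [h]
  by_cases h2 : t = ['E','d','g','e','F','u','n','c','t','i','o','n']
  · subst h2; simp [pvTable, List.lookup] at h; simp [h]
  by_cases h3 : t = ['N','o','d','e','F','u','n','c','t','i','o','n']
  · subst h3; simp [pvTable, List.lookup] at h; simp [h]
  by_cases h4 : t = ['G','l','o','b','a','l','F','u','n','c','t','i','o','n']
  · subst h4; simp [pvTable, List.lookup] at h; simp [h]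
  have b1 := beq_eq_false_iff_ne.mpr h1
  have b2 := beq_eq_false_iff_ne.mpr h2
  have b3 := beq_eq_false_iff_ne.mpr h3
  have b4 := beq_eq_false_iff_ne.mpr h4
  simp [pvTable, List.lookup, b1, b2, b3, b4] at h

-- the unconditional core equivalence on code points
theorem pv_core (cs : List Char) : pvGoA cs pvTable = pvGoB cs := by
  by_cases hpat : ∃ t nn d, List.lookup t pvTable = some nn ∧ d ≠ [] ∧
      d.all PySem.Chars.isdigit = true ∧ cs = t ++ '_' :: d
  · obtain ⟨t, nn, d, hl, hne, hd, hcs⟩ := hpat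
    subst hcs
    have hbase := pv_base_pat t d hd
    have hlen : 0 < d.length := List.length_pos_iff.mpr hne
    rcases pv_key_cases t nn hl with ⟨ht, hn⟩ | ⟨ht, hn⟩ | ⟨ht, hn⟩ | ⟨ht, hn⟩ <;> subst ht <;>
      rw [pvGoB] <;> rw [hbase] <;>
      simp [pvGoA, pvTable, PySem.Chars.startswith, PySem.Chars.strIsdigit,
            PySem.Chars.endswith, List.isSuffixOf, List.isPrefixOf, PySem.List.slice_from,
            List.lookup, List.dropLast, hne, hlen] <;>
      (intro x hx hfalse; exact absurd (List.all_eq_true.mp hd x hx) (by simp [hfalse]))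
  · push Not at hpat
    -- A's startswith-and-digits branch can fire for no key
    have hnof : ∀ t nn : List Char, List.lookup t pvTable = some nn →
        ¬ (PySem.Chars.startswith cs (t ++ ['_']) = true ∧
           PySem.Chars.strIsdigit (PySem.Chars.slice cs (some ((t.length + 1 : Nat) : Int)) none) = true) := by
      intro t nn hl ⟨hs, hdg⟩
      obtain ⟨d, hne, hd, hcs⟩ := pv_fire cs t hs hdg
      exact hpat t nn d hl hne hd hcs
    by_cases hk : ∃ V, List.lookup cs pvTable = some V
    · -- the segment is itself a key: everything is a closed literal computation
      obtain ⟨V, hV⟩ := hk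
      rcases pv_key_cases cs V hV with ⟨ht, _⟩ | ⟨ht, _⟩ | ⟨ht, _⟩ | ⟨ht, _⟩ <;> subst ht <;> decide
    · have hkn : List.lookup cs pvTable = none := Option.eq_none_iff_forall_ne_some.mpr
        (fun V h => hk ⟨V, h⟩)
      have hA : pvGoA cs pvTable = [String.ofList cs] := by
        have c1 : cs ≠ ['l','i','n','e','a','r'] := by rintro rfl; simp [pvTable] at hkn
        have c2 : cs ≠ ['E','d','g','e','F','u','n','c','t','i','o','n'] := by rintro rfl; simp [pvTable, List.lookup] at hkn
        have c3 : cs ≠ ['N','o','d','e','F','u','n','c','t','i','o','n'] := by rintro rfl; simp [pvTable, List.lookup] at hkn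
        have c4 : cs ≠ ['G','l','o','b','a','l','F','u','n','c','t','i','o','n'] := by rintro rfl; simp [pvTable, List.lookup] at hkn
        rw [pvTable, pv_step cs _ _ _ c1 (hnof _ ['l','a','y','e','r','s'] (by decide)),
            pv_step cs _ _ _ c2 (hnof _ ['e','d','g','e','_','f','n','s'] (by decide)),
            pv_step cs _ _ _ c3 (hnof _ ['n','o','d','e','_','f','n','s'] (by decide)),
            pv_step cs _ _ _ c4 (hnof _ ['g','l','o','b','a','l','_','f','n','s'] (by decide))]
        rfl
      have hB : pvGoB cs = [String.ofList cs] := by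
        rw [pvGoB]
        by_cases hc : (PySem.Chars.endswith (pvRstripDigits cs) ['_']
            && decide ((pvRstripDigits cs).length < cs.length)) = true
        · rw [if_pos hc]
          simp only [Bool.and_eq_true, decide_eq_true_eq] at hc
          obtain ⟨hend, hlt⟩ := hc
          obtain ⟨t, ht⟩ := (PySem.Chars.endswith_iff _ _).mp hend
          have hdrop : (pvRstripDigits cs).dropLast = t := by rw [← ht]; exact List.dropLast_concat
          have hnone : List.lookup t pvTable = none := by
            cases hLk : List.lookup t pvTable with
            | none => rfl
            | some nn =>
              exfalso
              have hsplit := pv_split cs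
              have hrne : (cs.reverse.takeWhile PySem.Chars.isdigit).reverse ≠ [] := by
                intro h0
                rw [h0, List.append_nil] at hsplit
                rw [← hsplit] at hlt
                exact lt_irrefl _ hlt
              have hshape : cs = t ++ '_' :: (cs.reverse.takeWhile PySem.Chars.isdigit).reverse := by
                conv_lhs => rw [hsplit]
                rw [← ht, List.append_assoc]
                rfl
              exact hpat t nn _ hLk hrne (pv_run_digits cs) hshape
          rw [hdrop, hnone, hkn]
        · rw [if_neg hc, hkn]
      rw [hA, hB]

-- ===== VERDICT (by name: the statement is the Claim_ definition above) =====
theorem haiku_segment_to_nnx_py_spec : Claim_equal_haiku_segment_to_nnx_py := by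
  intro segment _
  unfold Spec_haiku_segment_to_nnx_py haiku_segment_to_nnx_py haiku_segment_to_nnx_py_alt
  exact pv_core segment.toList
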